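-- pv_equiv track=rewrite | github.com/kazu0716/programing_training | atcoder/trainings/binary_searches/shooting_king.py | is_shooting
-- ===== SOURCE A (Python) =====
-- def is_shooting(H, S, score, N):
--     d = []
--     for i in range(N):
--         t = (score - H[i]) // S[i]
--         d.append(t)
--
--     d.sort()
--
--     for i in range(N):
--         if d[i] < i:
--             return False
--
--     return True
-- ===== SOURCE B (Python) =====
-- def is_shooting(H, S, score, N):
--     # Counting buckets instead of sorting: clamp each deadline into [0, N],
--     # fail fast on a negative deadline, then a prefix-count feasibility scan.
--     cnt = [0] * (N + 1)
--     for i in range(N):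
--         t = (score - H[i]) // S[i]
--         if t < 0:
--             return False
--         cnt[min(t, N)] += 1
--     run = 0
--     for j in range(N):
--         run += cnt[j]
--         if run > j + 1:
--             return False
--     return True
-- ===== Notes on version B (the rewrite author's own statement) =====
-- stated objective: alternative
-- what changed: Replaces sort-then-scan over the computed deadlines by a counting pass (deadlines clamped into [0,N] buckets, failing fast on a negative one) followed by a prefix-count feasibility scan, so no sort is performed.
import Mathlib
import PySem

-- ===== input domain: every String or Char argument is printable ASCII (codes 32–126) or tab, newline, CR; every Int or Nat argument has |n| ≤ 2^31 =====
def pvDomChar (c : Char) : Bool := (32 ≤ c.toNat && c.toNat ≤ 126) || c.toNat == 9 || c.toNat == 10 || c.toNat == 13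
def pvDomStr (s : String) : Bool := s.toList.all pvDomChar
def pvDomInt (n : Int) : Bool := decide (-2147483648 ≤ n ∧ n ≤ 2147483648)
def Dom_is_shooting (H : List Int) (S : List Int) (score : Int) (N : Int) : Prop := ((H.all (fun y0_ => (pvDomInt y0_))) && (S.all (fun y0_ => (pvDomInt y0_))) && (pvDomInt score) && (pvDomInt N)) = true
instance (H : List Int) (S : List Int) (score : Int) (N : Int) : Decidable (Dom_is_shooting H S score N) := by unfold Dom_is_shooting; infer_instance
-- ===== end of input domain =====

-- B replaces A's sort-then-scan over the computed deadlines by counting buckets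
-- (deadlines clamped into [0, N]) and a prefix-count feasibility scan, avoiding the sort.

-- ===== PORT A =====
-- the loop `for i in range(N): if d[i] < i: return False` (early return)
def pvALoop (d : List Int) : List Int → Bool
  | [] => true
  | i :: is => if PySem.List.pyGetD d i 0 < i then false else pvALoop d is

def is_shooting (H : List Int) (S : List Int) (score : Int) (N : Int) : Bool :=
  -- d = []; for i in range(N): d.append((score - H[i]) // S[i])  (indexing exact under Pre_)
  let d := (PySem.List.pyRange 0 N 1).foldl
    (fun acc i => acc ++ [PySem.Int.floordiv (score - PySem.List.pyGetD H i 0) (PySem.List.pyGetD S i 0)]) []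
  -- d.sort(); then the check loop
  pvALoop (PySem.List.sorted d id) (PySem.List.pyRange 0 N 1)

-- ===== PORT B =====
-- first loop of Source B: compute t, early False on t < 0, else cnt[min(t, N)] += 1
-- (the List.set index is always in range under Pre_, where Python's cnt[...] is exact)
def pvBLoop1 (H : List Int) (S : List Int) (score : Int) (N : Int) : List Int → List Int → Option (List Int)
  | [], cnt => some cnt
  | i :: is, cnt =>
    let t := PySem.Int.floordiv (score - PySem.List.pyGetD H i 0) (PySem.List.pyGetD S i 0)
    if t < 0 then none
    else pvBLoop1 H S score N is (cnt.set (min t N).toNat (cnt.getD (min t N).toNat 0 + 1))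

-- second loop of Source B: run += cnt[j]; early False when run > j + 1
def pvBLoop2 (cnt : List Int) : List Int → Int → Bool
  | [], _ => true
  | j :: js, run =>
    let run' := run + cnt.getD j.toNat 0
    if j + 1 < run' then false else pvBLoop2 cnt js run'

def is_shooting_alt (H : List Int) (S : List Int) (score : Int) (N : Int) : Bool :=
  -- cnt = [0] * (N + 1)
  match pvBLoop1 H S score N (PySem.List.pyRange 0 N 1) (List.replicate (N + 1).toNat 0) with
  | none => false
  | some cnt => pvBLoop2 cnt (PySem.List.pyRange 0 N 1) 0

-- ===== PRECONDITION & SPEC =====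
-- Pre_ excludes exactly the inputs where Python A raises: an index i < N beyond
-- H or S (IndexError) or S[i] == 0 (ZeroDivisionError).
def Pre_is_shooting (H : List Int) (S : List Int) (score : Int) (N : Int) : Prop :=
  N.toNat ≤ H.length ∧ N.toNat ≤ S.length ∧ ∀ i : Nat, i < N.toNat → S.getD i 0 ≠ 0
instance (H : List Int) (S : List Int) (score : Int) (N : Int) : Decidable (Pre_is_shooting H S score N) := by unfold Pre_is_shooting; infer_instance

def pvWitness_is_shooting : List Int × List Int × Int × Int := ([1, 4], [1, 2], 5, 2)

def Spec_is_shooting (H : List Int) (S : List Int) (score : Int) (N : Int) (out : Bool) : Prop := out = is_shooting_alt H S score N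
instance (H : List Int) (S : List Int) (score : Int) (N : Int) (out : Bool) : Decidable (Spec_is_shooting H S score N out) := by unfold Spec_is_shooting; infer_instance

-- ===== CLAIM (what is proved, stated in full; the proofs are below) =====
def Claim_equal_is_shooting : Prop := ∀ (H : List Int) (S : List Int) (score : Int) (N : Int), Dom_is_shooting H S score N → Pre_is_shooting H S score N → Spec_is_shooting H S score N (is_shooting H S score N)

-- ===== LEMMAS AND PROOFS =====

-- t-value of round i, and the list of all of them (proof-side abbreviations)
def pvT (H : List Int) (S : List Int) (score : Int) (i : Int) : Int :=
  PySem.Int.floordiv (score - PySem.List.pyGetD H i 0) (PySem.List.pyGetD S i 0)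

def pvTs (H : List Int) (S : List Int) (score : Int) (N : Int) : List Int :=
  (PySem.List.pyRange 0 N 1).map (pvT H S score)

theorem pvALoop_iff (d : List Int) (l : List Int) :
    pvALoop d l = true ↔ ∀ i ∈ l, ¬ (PySem.List.pyGetD d i 0 < i) := by
  induction l with
  | nil => simp [pvALoop]
  | cons i is ih =>
    simp only [pvALoop]
    split_ifs with h
    · simp [h]
    · rw [not_lt] at h
      simp [ih, h]

theorem pvBLoop1_none (H S : List Int) (score N : Int) :
    ∀ (l cnt : List Int),
      pvBLoop1 H S score N l cnt = none ↔ ∃ i ∈ l, pvT H S score i < 0 := by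
  intro l
  induction l with
  | nil => intro cnt; simp [pvBLoop1]
  | cons i is ih =>
    intro cnt
    simp only [pvBLoop1, pvT]
    split_ifs with h
    · simp [h]
    · simp [ih, pvT, h]

theorem pvBLoop1_some (H S : List Int) (score N : Int) :
    ∀ (l : List Int), (∀ i ∈ l, ¬ pvT H S score i < 0) → ∀ (cnt : List Int),
      pvBLoop1 H S score N l cnt =
        some (l.foldl (fun c i =>
          c.set (min (pvT H S score i) N).toNat (c.getD (min (pvT H S score i) N).toNat 0 + 1)) cnt) := by
  intro l
  induction l with
  | nil => intro _ cnt; simp [pvBLoop1]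
  | cons i is ih =>
    intro h cnt
    have hi : ¬ pvT H S score i < 0 := h i (by simp)
    simp only [pvBLoop1, pvT] at hi ⊢
    rw [if_neg hi]
    rw [ih (fun j hj => h j (by simp [hj]))]
    rw [List.foldl_cons]
    simp only [pvT]

theorem pvSetGetD (c : List Int) (a : Nat) (v : Int) (k : Nat) (ha : a < c.length) :
    (c.set a v).getD k 0 = if k = a then v else c.getD k 0 := by
  by_cases h : k = a
  · subst h
    simp [List.getD_eq_getElem?_getD, ha]
  · have h2 : a ≠ k := fun hc => h hc.symm
    simp [List.getD_eq_getElem?_getD, h, h2]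

theorem pvBucket (g : Int → Nat) :
    ∀ (l : List Int) (cnt : List Int), (∀ i ∈ l, g i < cnt.length) → ∀ k : Nat,
      (l.foldl (fun c i => c.set (g i) (c.getD (g i) 0 + 1)) cnt).getD k 0
        = cnt.getD k 0 + (l.countP (fun i => decide (g i = k)) : Int) := by
  intro l
  induction l with
  | nil => intro cnt _ k; simp
  | cons i is ih =>
    intro cnt h k
    have hlen : g i < cnt.length := h i (by simp)
    simp only [List.foldl_cons]
    rw [ih _ (by intro j hj; simpa using h j (by simp [hj]))]
    rw [pvSetGetD cnt (g i) _ k hlen]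
    rw [List.countP_cons]
    by_cases hk : k = g i
    · subst hk
      simp only [decide_true, if_true]
      push_cast
      ring
    · have hk' : ¬ (g i = k) := fun hc => hk hc.symm
      simp [hk, hk']

theorem pvBLoop2_iff (cnt : List Int) :
    ∀ (l : List Int) (run : Int),
      pvBLoop2 cnt l run = true ↔
        ∀ k : Nat, (hk : k < l.length) →
          run + ((l.take (k+1)).map (fun j => cnt.getD j.toNat 0)).sum ≤ l[k]'hk + 1 := by
  intro l
  induction l with
  | nil => intro run; simp [pvBLoop2]
  | cons j js ih =>
    intro run
    simp only [pvBLoop2]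
    split_ifs with h
    · simp only [false_iff]
      intro hall
      have := hall 0 (by simp)
      simp only [List.take_succ_cons, List.take_zero, List.map_cons, List.map_nil,
        List.sum_cons, List.sum_nil, List.getElem_cons_zero, add_zero] at this
      omega
    · rw [not_lt] at h
      rw [ih (run + cnt.getD j.toNat 0)]
      constructor
      · intro hall k hk
        cases k with
        | zero => simpa using h
        | succ k =>
          have := hall k (by simpa using hk)
          simp only [List.take_succ_cons, List.map_cons, List.sum_cons, List.getElem_cons_succ]
          omega
      · intro hall k hk
        have := hall (k+1) (by simpa using hk)
        simp only [List.take_succ_cons, List.map_cons, List.sum_cons, List.getElem_cons_succ] at this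
        omega

theorem pvCountSplit (h : Int → Nat) (l : List Int) (k : Nat) :
    l.countP (fun t => decide (h t ≤ k + 1))
      = l.countP (fun t => decide (h t ≤ k)) + l.countP (fun t => decide (h t = k + 1)) := by
  induction l with
  | nil => simp
  | cons a l ih =>
    simp only [List.countP_cons, ih, decide_eq_true_eq]
    split_ifs <;> omega

theorem pvPrefixSum (h : Int → Nat) (ts : List Int) :
    ∀ k : Nat,
      ((List.range (k+1)).map (fun j => ((ts.countP (fun t => decide (h t = j)) : Nat) : Int))).sum
        = ((ts.countP (fun t => decide (h t ≤ k)) : Nat) : Int) := by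
  intro k
  induction k with
  | zero =>
    simp only [zero_add, List.range_one, List.map_cons, List.map_nil, List.sum_cons,
      List.sum_nil, add_zero]
    congr 1
    apply List.countP_congr
    intro t _
    simp
  | succ k ih =>
    rw [List.range_succ, List.map_append, List.sum_append, ih]
    simp only [List.map_cons, List.map_nil, List.sum_cons, List.sum_nil, add_zero]
    rw [pvCountSplit h ts k]
    push_cast
    ring

theorem pvSortedCountGe (j : Int) :
    ∀ (s : List Int), s.Pairwise (· ≤ ·) → ∀ i : Nat, (hi : i < s.length) → s[i]'hi ≤ j →
      i + 1 ≤ s.countP (fun t => decide (t ≤ j)) := by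
  intro s
  induction s with
  | nil => intro _ i hi; simp at hi
  | cons a s ih =>
    intro hp i hi hle
    rw [List.pairwise_cons] at hp
    rw [List.countP_cons]
    cases i with
    | zero =>
      simp only [List.getElem_cons_zero] at hle
      simp [hle]
    | succ i =>
      simp only [List.getElem_cons_succ] at hle
      have h1 := ih hp.2 i (by simpa using hi) hle
      have h2 : a ≤ j := le_trans (hp.1 _ (List.getElem_mem _)) hle
      simp [h2]
      omega

theorem pvSortedCountLe (j : Int) :
    ∀ (s : List Int), s.Pairwise (· ≤ ·) → ∀ i : Nat, (hi : i < s.length) → j < s[i]'hi →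
      s.countP (fun t => decide (t ≤ j)) ≤ i := by
  intro s
  induction s with
  | nil => intro _ i hi; simp at hi
  | cons a s ih =>
    intro hp i hi hlt
    rw [List.pairwise_cons] at hp
    rw [List.countP_cons]
    cases i with
    | zero =>
      simp only [List.getElem_cons_zero] at hlt
      have h0 : s.countP (fun t => decide (t ≤ j)) = 0 := by
        rw [List.countP_eq_zero]
        intro b hb
        have := hp.1 b hb
        simp; omega
      simp [h0]
      omega
    | succ i =>
      simp only [List.getElem_cons_succ] at hlt
      have h1 := ih hp.2 i (by simpa using hi) hlt
      split_ifs <;> omega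

theorem pvBucketT (H S : List Int) (score N : Int) (l cnt : List Int)
    (h : ∀ i ∈ l, (min (pvT H S score i) N).toNat < cnt.length) (k : Nat) :
    (l.foldl (fun c i =>
        c.set (min (pvT H S score i) N).toNat (c.getD (min (pvT H S score i) N).toNat 0 + 1)) cnt).getD k 0
      = cnt.getD k 0 + (l.countP (fun i => decide ((min (pvT H S score i) N).toNat = k)) : Int) :=
  pvBucket (fun i => (min (pvT H S score i) N).toNat) l cnt h k

-- ===== VERDICT (by name: the statement is the Claim_ definition above) =====
theorem is_shooting_spec : Claim_equal_is_shooting := by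
  intro H S score N hDom hPre
  unfold Spec_is_shooting
  by_cases hN0 : N ≤ 0
  · simp [is_shooting, is_shooting_alt, PySem.List.pyRange_one_eq_nil hN0,
      pvALoop, pvBLoop1, pvBLoop2]
  · rw [not_le] at hN0
    set n := N.toNat with hn
    have hNn : (n : Int) = N := Int.toNat_of_nonneg (le_of_lt hN0)
    set ts := pvTs H S score N with hts
    have hlen_ts : ts.length = n := by
      simp [hts, pvTs, PySem.List.length_pyRange_one]
      omega
    set s := PySem.List.sorted ts id with hs
    have hperm : s.Perm ts := PySem.List.sorted_perm ts id false
    have hpair : s.Pairwise (· ≤ ·) := by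
      have := PySem.List.sorted_pairwise (xs := ts) (key := id)
      simpa using this
    have hlen_s : s.length = n := by rw [hperm.length_eq, hlen_ts]
    -- A's value: d is exactly ts, then the check loop over the sorted list
    have e1 : is_shooting H S score N = pvALoop s (PySem.List.pyRange 0 N 1) := by
      simp only [is_shooting]
      rw [PySem.List.foldl_append_singleton_eq_map, List.nil_append]
      rfl
    have hA : is_shooting H S score N = true ↔
        ∀ k : Nat, (hk : k < s.length) → ((k : Int)) ≤ s[k]'hk := by
      rw [e1, pvALoop_iff]
      constructor
      · intro hall k hk
        have hkN : (k : Int) < N := by omega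
        have hmem : (k : Int) ∈ PySem.List.pyRange 0 N 1 := by
          rw [PySem.List.mem_pyRange_one]; omega
        have h1 := hall (k : Int) hmem
        rw [PySem.List.pyGetD_eq_getElem s 0 (by omega) (by omega)] at h1
        simp only [Int.toNat_natCast] at h1
        omega
      · intro hall i hi
        rw [PySem.List.mem_pyRange_one] at hi
        have hk : i.toNat < s.length := by omega
        have h1 := hall i.toNat hk
        rw [PySem.List.pyGetD_eq_getElem s 0 (by omega) (by omega)]
        omega
    by_cases hneg : ∃ i ∈ PySem.List.pyRange 0 N 1, pvT H S score i < 0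
    · -- a negative deadline: both programs answer false
      have hBnone := (pvBLoop1_none H S score N (PySem.List.pyRange 0 N 1)
        (List.replicate (N + 1).toNat 0)).mpr hneg
      have hB : is_shooting_alt H S score N = false := by
        simp only [is_shooting_alt]
        rw [hBnone]
      obtain ⟨i, hiL, hit⟩ := hneg
      have hmem : pvT H S score i ∈ ts := by
        rw [hts, pvTs]; exact List.mem_map_of_mem hiL
      obtain ⟨k, hk, hkeq⟩ := List.mem_iff_getElem.mp (hperm.mem_iff.mpr hmem)
      have hPAfalse : ¬ (∀ k : Nat, (hk : k < s.length) → ((k : Int)) ≤ s[k]'hk) := by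
        intro hall
        have := hall k hk
        rw [hkeq] at this
        omega
      have hAf : is_shooting H S score N = false := by
        cases hAb : is_shooting H S score N
        · rfl
        · exact absurd (hA.mp hAb) hPAfalse
      rw [hAf, hB]
    · -- all deadlines nonnegative: compare bucket counts with the sorted check
      have hall : ∀ i ∈ PySem.List.pyRange 0 N 1, ¬ pvT H S score i < 0 := by
        intro i hi hlt; exact hneg ⟨i, hi, hlt⟩
      have hts_nonneg : ∀ t ∈ ts, 0 ≤ t := by
        intro t ht
        rw [hts, pvTs, List.mem_map] at ht
        obtain ⟨i, hi, rfl⟩ := ht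
        exact not_lt.mp (hall i hi)
      have hsome := pvBLoop1_some H S score N (PySem.List.pyRange 0 N 1) hall
        (List.replicate (N + 1).toNat 0)
      set cnt : List Int := (PySem.List.pyRange 0 N 1).foldl (fun c i =>
        c.set (min (pvT H S score i) N).toNat (c.getD (min (pvT H S score i) N).toNat 0 + 1))
        (List.replicate (N + 1).toNat 0) with hcntdef
      have hB : is_shooting_alt H S score N = pvBLoop2 cnt (PySem.List.pyRange 0 N 1) 0 := by
        simp only [is_shooting_alt]
        rw [hsome]
      have hcnt : ∀ k : Nat, cnt.getD k 0
          = ((ts.countP (fun t => decide ((min t N).toNat = k)) : Nat) : Int) := by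
        intro k
        rw [hcntdef, pvBucketT H S score N _ _ (by
          intro i _
          have h1 : min (pvT H S score i) N ≤ N := min_le_right _ _
          rw [List.length_replicate]
          omega) k]
        have h0 : (List.replicate (N + 1).toNat (0 : Int)).getD k 0 = 0 := by
          rcases lt_or_ge k (N + 1).toNat with h | h
          · simp [List.getD_eq_getElem?_getD, h]
          · simp [List.getD_eq_getElem?_getD, Nat.not_lt.mpr h]
        rw [h0, zero_add, hts, pvTs, List.countP_map]
        rfl
      have hsum : ∀ k : Nat, k < n →
          (((PySem.List.pyRange 0 N 1).take (k + 1)).map (fun j => cnt.getD j.toNat 0)).sum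
            = ((ts.countP (fun t => decide (t ≤ (k : Int))) : Nat) : Int) := by
        intro k hkn
        have hsplit := PySem.List.pyRange_one_append 0 ((k : Int) + 1) N (by omega) (by omega)
        have hlen1 : (PySem.List.pyRange 0 ((k : Int) + 1) 1).length = k + 1 := by
          rw [PySem.List.length_pyRange_one]; omega
        rw [hsplit, List.take_left' hlen1]
        have hrange : PySem.List.pyRange 0 ((k : Int) + 1) 1
            = (List.range (k + 1)).map (fun m : Nat => ((m : Int))) := by
          rw [PySem.List.pyRange_one]
          have : (((k : Int) + 1) - 0).toNat = k + 1 := by omega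
          rw [this]
          apply List.map_congr_left
          intro m _
          omega
        rw [hrange, List.map_map]
        have hfun : ∀ m ∈ List.range (k + 1),
            ((fun j => cnt.getD j.toNat 0) ∘ (fun m : Nat => ((m : Int)))) m
              = ((ts.countP (fun t => decide ((min t N).toNat = m)) : Nat) : Int) := by
          intro m _
          simp only [Function.comp, Int.toNat_natCast]
          exact hcnt m
        rw [List.map_congr_left hfun]
        have hps : ((List.range (k + 1)).map
            (fun j => ((ts.countP (fun t => decide ((min t N).toNat = j)) : Nat) : Int))).sum
            = ((ts.countP (fun t => decide ((min t N).toNat ≤ k)) : Nat) : Int) :=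
          pvPrefixSum (fun t => (min t N).toNat) ts k
        rw [hps]
        have hkN : (k : Int) < N := by omega
        congr 1
        apply List.countP_congr
        intro t ht
        have h0t := hts_nonneg t ht
        simp only [decide_eq_true_eq]
        omega
      have hB2 : is_shooting_alt H S score N = true ↔
          ∀ k : Nat, k < n →
            ((ts.countP (fun t => decide (t ≤ (k : Int))) : Nat) : Int) ≤ (k : Int) + 1 := by
        rw [hB, pvBLoop2_iff]
        constructor
        · intro hl k hkn
          have hkl : k < (PySem.List.pyRange 0 N 1).length := by
            rw [PySem.List.length_pyRange_one]; omega
          have h1 := hl k hkl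
          rw [hsum k hkn] at h1
          have hgk : (PySem.List.pyRange 0 N 1)[k]'hkl = (k : Int) := by
            rw [PySem.List.getElem_pyRange_one]; omega
          rw [hgk] at h1
          omega
        · intro hl k hkl
          have hkn : k < n := by
            rw [PySem.List.length_pyRange_one] at hkl; omega
          have h1 := hl k hkn
          rw [hsum k hkn]
          have hgk : (PySem.List.pyRange 0 N 1)[k]'hkl = (k : Int) := by
            rw [PySem.List.getElem_pyRange_one]; omega
          rw [hgk]
          omega
      -- the bridge: sorted check ⟺ prefix counts
      have hbridge : (∀ k : Nat, (hk : k < s.length) → ((k : Int)) ≤ s[k]'hk) ↔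
          (∀ k : Nat, k < n →
            ((ts.countP (fun t => decide (t ≤ (k : Int))) : Nat) : Int) ≤ (k : Int) + 1) := by
        constructor
        · intro hPA k hkn
          rw [← hperm.countP_eq]
          by_contra hcon
          rw [not_le] at hcon
          have hcle := List.countP_le_length (l := s) (p := fun t => decide (t ≤ (k : Int)))
          have hk1 : k + 1 < s.length := by omega
          have hge := hPA (k + 1) hk1
          have hle := pvSortedCountLe ((k : Int)) s hpair (k + 1) hk1 (by push_cast at hge ⊢; omega)
          omega
        · intro hPB k hk
          by_contra hcon
          rw [not_le] at hcon
          have h0 : 0 ≤ s[k]'hk := hts_nonneg _ (hperm.mem_iff.mp (List.getElem_mem hk))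
          have hmk : (s[k]'hk).toNat < k := by omega
          have hge := pvSortedCountGe (((s[k]'hk).toNat : Int)) s hpair k hk (by omega)
          have hle := hPB (s[k]'hk).toNat (by omega)
          rw [← hperm.countP_eq] at hle
          omega
      rw [Bool.eq_iff_iff, hA, hB2, hbridge]
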